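-- pv_equiv track=rewrite | github.com/hmassonn/hamming_XOR | ex05.py | get_list_of_key_block
-- ===== SOURCE A (Python) =====
-- def get_list_of_key_block(size_key, cipher_text):
-- 	all_lists = [''] * size_key
-- 	for i in range(size_key):
-- 		y = i
-- 		while y < len(cipher_text):
-- 			all_lists[i] += cipher_text[y]
-- 			y += size_key
-- 	return all_lists
-- ===== SOURCE B (Python) =====
-- def get_list_of_key_block(size_key, cipher_text):
--     if size_key <= 0:
--         return []
--     cols = [''] * size_key
--     for idx, ch in enumerate(cipher_text):
--         cols[idx % size_key] += ch
--     return cols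
-- ===== Notes on version B (the rewrite author's own statement) =====
-- stated objective: faster
-- what changed: B replaces A's column-by-column nested traversal (for each column, a strided while over the text) with a single row-major pass that distributes each character into its column by idx % size_key.
import Mathlib
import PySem

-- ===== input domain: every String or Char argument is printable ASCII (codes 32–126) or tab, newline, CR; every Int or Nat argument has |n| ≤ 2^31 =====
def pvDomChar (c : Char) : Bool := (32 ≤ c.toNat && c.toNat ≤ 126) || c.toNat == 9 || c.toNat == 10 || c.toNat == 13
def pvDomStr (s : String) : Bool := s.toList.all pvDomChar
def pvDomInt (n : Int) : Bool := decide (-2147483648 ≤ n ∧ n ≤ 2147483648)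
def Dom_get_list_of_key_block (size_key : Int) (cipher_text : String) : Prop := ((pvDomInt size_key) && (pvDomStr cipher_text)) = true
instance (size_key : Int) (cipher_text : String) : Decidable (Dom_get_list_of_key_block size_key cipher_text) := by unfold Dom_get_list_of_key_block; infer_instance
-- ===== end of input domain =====

-- B replaces A's per-column strided scans with one row-major pass over the text, distributing each character by idx % size_key.
-- Both ports build the columns as List Char and convert with String.ofList at the return, which is exact for Python's string concatenation.

-- ===== PORT A =====
-- inner while loop of A: `while y < len: all_lists[i] += cipher_text[y]; y += size_key`.
-- The `0 < k` conjunct only makes the recursion total; A runs this loop only with k ≥ 1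
-- (i ∈ range(size_key)), where it is exactly the Python loop. cs.getD y ' ' = cipher_text[y], exact since y < len(cs).
def pvInnerA (cs : List Char) (k : Nat) (y : Nat) (acc : List Char) : List Char :=
  if h : y < cs.length ∧ 0 < k then
    pvInnerA cs k (y + k) (acc ++ [cs.getD y ' '])
  else acc
termination_by cs.length - y
decreasing_by omega

def get_list_of_key_block (size_key : Int) (cipher_text : String) : List String :=
  ((PySem.List.pyRange 0 size_key 1).foldl
    (fun all i => all.set i.toNat (pvInnerA cipher_text.toList size_key.toNat i.toNat (all.getD i.toNat [])))
    (List.replicate size_key.toNat [])).map String.ofList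

-- ===== PORT B =====
-- the `for idx, ch in enumerate(cipher_text)` loop of Source B, carrying (cols, idx) as state
def pvFillB (k : Nat) (cols : List (List Char)) (idx : Nat) : List Char → List (List Char)
  | [] => cols
  | c :: rest => pvFillB k (cols.set (idx % k) (cols.getD (idx % k) [] ++ [c])) (idx + 1) rest

def get_list_of_key_block_alt (size_key : Int) (cipher_text : String) : List String :=
  if size_key ≤ 0 then []
  else (pvFillB size_key.toNat (List.replicate size_key.toNat []) 0 cipher_text.toList).map String.ofList

-- ===== PRECONDITION & SPEC =====
def Spec_get_list_of_key_block (size_key : Int) (cipher_text : String) (out : List String) : Prop := out = get_list_of_key_block_alt size_key cipher_text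
instance (size_key : Int) (cipher_text : String) (out : List String) : Decidable (Spec_get_list_of_key_block size_key cipher_text out) := by unfold Spec_get_list_of_key_block; infer_instance

-- ===== CLAIM (what is proved, stated in full; the proofs are below) =====
def Claim_equal_get_list_of_key_block : Prop := ∀ (size_key : Int) (cipher_text : String), Dom_get_list_of_key_block size_key cipher_text → Spec_get_list_of_key_block size_key cipher_text (get_list_of_key_block size_key cipher_text)

-- ===== LEMMAS AND PROOFS =====

-- the chars A's inner loop collects: positions y, y+k, y+2k, … of cs
def pvStride (cs : List Char) (k : Nat) (y : Nat) : List Char :=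
  if h : y < cs.length ∧ 0 < k then cs.getD y ' ' :: pvStride cs k (y + k) else []
termination_by cs.length - y
decreasing_by omega

-- the chars B's pass puts into column j, scanning cs with running index idx
def pvSel (k j : Nat) : Nat → List Char → List Char
  | _, [] => []
  | idx, c :: rest => (if idx % k = j then [c] else []) ++ pvSel k j (idx + 1) rest

theorem pvInnerA_eq_stride (cs : List Char) (k : Nat) :
    ∀ y acc, pvInnerA cs k y acc = acc ++ pvStride cs k y := by
  refine pvStride.induct cs k (fun y => ∀ acc, pvInnerA cs k y acc = acc ++ pvStride cs k y) ?_ ?_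
  · intro y h ih acc
    rw [pvInnerA, pvStride, dif_pos h, dif_pos h, ih]
    simp
  · intro y h acc
    rw [pvInnerA, pvStride, dif_neg h, dif_neg h]
    simp

theorem stride_shift (c : Char) (cs : List Char) (k d : Nat) :
    pvStride (c :: cs) k (d + 1) = pvStride cs k d := by
  refine pvStride.induct cs k (fun d => pvStride (c :: cs) k (d + 1) = pvStride cs k d) ?_ ?_ d
  · intro y h ih
    have h1 : y + 1 < (c :: cs).length ∧ 0 < k := by simp only [List.length_cons]; omega
    conv_lhs => rw [pvStride]
    conv_rhs => rw [pvStride]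
    rw [dif_pos h1, dif_pos h, List.getD_cons_succ, show y + 1 + k = y + k + 1 from by omega, ih]
  · intro y h
    have h1 : ¬ (y + 1 < (c :: cs).length ∧ 0 < k) := by simp only [List.length_cons]; omega
    conv_lhs => rw [pvStride]
    conv_rhs => rw [pvStride]
    rw [dif_neg h1, dif_neg h]

theorem sel_eq_stride (k j : Nat) (hk : 0 < k) (hj : j < k) :
    ∀ (cs : List Char) (idx d : Nat), d < k → (idx + d) % k = j →
      pvSel k j idx cs = pvStride cs k d := by
  intro cs
  induction cs with
  | nil =>
    intro idx d _ _
    rw [pvSel, pvStride, dif_neg (by simp)]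
  | cons c rest ih =>
    intro idx d hd hmod
    rw [pvSel]
    rcases Nat.eq_zero_or_pos d with rfl | hdpos
    · -- d = 0 : this position is selected
      have hsel : idx % k = j := by simpa using hmod
      have hrec : pvSel k j (idx + 1) rest = pvStride rest k (k - 1) := by
        apply ih (idx + 1) (k - 1) (by omega)
        rw [show idx + 1 + (k - 1) = idx + k from by omega, Nat.add_mod_right, hsel]
      have h2 : 0 < (c :: rest).length ∧ 0 < k := ⟨by simp, hk⟩
      have hs := stride_shift c rest k (k - 1)
      rw [show k - 1 + 1 = k from by omega] at hs
      rw [if_pos hsel, hrec]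
      conv_rhs => rw [pvStride]
      rw [dif_pos h2]
      simp only [List.getD_cons_zero, List.singleton_append, Nat.zero_add]
      rw [hs]
    · -- d ≥ 1 : this position is not selected
      have hne : idx % k ≠ j := by
        intro he
        have hjd : (j + d) % k = j := by
          rw [← he, Nat.mod_add_mod, hmod]
          exact he.symm
        rcases Nat.lt_or_ge (j + d) k with h5 | h5
        · rw [Nat.mod_eq_of_lt h5] at hjd; omega
        · rw [Nat.mod_eq_sub_mod h5, Nat.mod_eq_of_lt (by omega)] at hjd; omega
      have hrec : pvSel k j (idx + 1) rest = pvStride rest k (d - 1) := by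
        apply ih (idx + 1) (d - 1) (by omega)
        rw [show idx + 1 + (d - 1) = idx + d from by omega, hmod]
      have hs := stride_shift c rest k (d - 1)
      rw [show d - 1 + 1 = d from by omega] at hs
      rw [if_neg hne, hrec, List.nil_append, hs]

theorem fillB_spec (k : Nat) (hk : 0 < k) :
    ∀ (cs : List Char) (idx : Nat) (cols : List (List Char)), cols.length = k →
      (pvFillB k cols idx cs).length = k ∧
      ∀ j, j < k → (pvFillB k cols idx cs).getD j [] = cols.getD j [] ++ pvSel k j idx cs := by
  intro cs
  induction cs with
  | nil =>
    intro idx cols hlen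
    rw [pvFillB]
    exact ⟨hlen, fun j _ => by rw [pvSel]; simp⟩
  | cons c rest ih =>
    intro idx cols hlen
    rw [pvFillB]
    have hlen' : (cols.set (idx % k) (cols.getD (idx % k) [] ++ [c])).length = k := by
      simp [hlen]
    obtain ⟨hL, hG⟩ := ih (idx + 1) (cols.set (idx % k) (cols.getD (idx % k) [] ++ [c])) hlen'
    have hset : ∀ j, j < k → (cols.set (idx % k) (cols.getD (idx % k) [] ++ [c])).getD j [] =
        cols.getD j [] ++ (if idx % k = j then [c] else []) := by
      intro j hj
      have hjl : j < (cols.set (idx % k) (cols.getD (idx % k) [] ++ [c])).length := by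
        rw [hlen']; exact hj
      have hjc : j < cols.length := by omega
      rw [List.getD_eq_getElem _ _ hjl]
      rcases eq_or_ne (idx % k) j with he | hne
      · subst he
        rw [List.getElem_set_self, if_pos rfl]
      · rw [List.getElem_set_ne hne, if_neg hne, List.append_nil,
          List.getD_eq_getElem _ _ hjc]
    refine ⟨hL, fun j hj => ?_⟩
    rw [hG j hj, hset j hj, pvSel, List.append_assoc]

-- A's outer for-loop over range(size_key): after columns 0..n-1, entry j holds its stride for j < n and [] otherwise
theorem foldA_spec (cs : List Char) (k : Nat) :
    ∀ n : Nat, n ≤ k →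
      ((PySem.List.pyRange 0 (n : Int) 1).foldl
        (fun all i => all.set i.toNat (pvInnerA cs k i.toNat (all.getD i.toNat [])))
        (List.replicate k ([] : List Char))).length = k ∧
      ∀ j, j < k → ((PySem.List.pyRange 0 (n : Int) 1).foldl
        (fun all i => all.set i.toNat (pvInnerA cs k i.toNat (all.getD i.toNat [])))
        (List.replicate k ([] : List Char))).getD j [] = if j < n then pvStride cs k j else [] := by
  intro n
  induction n with
  | zero =>
    intro _
    rw [show ((0 : Nat) : Int) = 0 from rfl, PySem.List.pyRange_one_eq_nil (by norm_num), List.foldl_nil]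
    refine ⟨by simp, fun j hj => ?_⟩
    have hjl : j < (List.replicate k ([] : List Char)).length := by simpa using hj
    rw [List.getD_eq_getElem _ _ hjl]
    simp
  | succ n ih =>
    intro hn
    obtain ⟨hL, hG⟩ := ih (by omega)
    have hc : ((n + 1 : Nat) : Int) = (n : Int) + 1 := by push_cast; ring
    have hrange : PySem.List.pyRange 0 ((n : Int) + 1) 1 =
        PySem.List.pyRange 0 (n : Int) 1 ++ [(n : Int)] :=
      PySem.List.pyRange_one_succ_right (by positivity)
    rw [hc, hrange, List.foldl_append, List.foldl_cons, List.foldl_nil]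
    set R := (PySem.List.pyRange 0 (n : Int) 1).foldl
      (fun all i => all.set i.toNat (pvInnerA cs k i.toNat (all.getD i.toNat [])))
      (List.replicate k ([] : List Char)) with hR
    have hnk : n < k := by omega
    simp only [Int.toNat_natCast]
    have hgn : R.getD n [] = [] := by rw [hG n hnk]; simp
    rw [hgn]
    have hsl : (R.set n (pvInnerA cs k n [])).length = k := by simp [hL]
    refine ⟨hsl, fun j hj => ?_⟩
    have hjl : j < (R.set n (pvInnerA cs k n [])).length := by omega
    rw [List.getD_eq_getElem _ _ hjl]
    rcases eq_or_ne n j with rfl | hne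
    · rw [List.getElem_set_self, pvInnerA_eq_stride, List.nil_append, if_pos (by omega)]
    · rw [List.getElem_set_ne hne, ← List.getD_eq_getElem R [] (by omega : j < R.length), hG j hj]
      rcases Nat.lt_or_ge j n with h | h
      · rw [if_pos h, if_pos (by omega)]
      · rw [if_neg (by omega), if_neg (by omega)]

-- ===== VERDICT (by name: the statement is the Claim_ definition above) =====
theorem get_list_of_key_block_spec : Claim_equal_get_list_of_key_block := by
  intro size_key cipher_text _
  unfold Spec_get_list_of_key_block get_list_of_key_block get_list_of_key_block_alt
  rcases le_or_gt size_key 0 with hle | hpos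
  · rw [if_pos hle, PySem.List.pyRange_one_eq_nil hle, List.foldl_nil]
    have h0 : size_key.toNat = 0 := by omega
    rw [h0]
    simp
  · rw [if_neg (by omega)]
    set cs := cipher_text.toList with hcs
    set k := size_key.toNat with hk
    have hk0 : 0 < k := by omega
    have hcast : size_key = (k : Int) := by omega
    obtain ⟨hAL, hAG⟩ := foldA_spec cs k k (le_refl k)
    obtain ⟨hBL, hBG⟩ := fillB_spec k hk0 cs 0 (List.replicate k []) (by simp)
    rw [hcast]
    apply List.ext_getElem
    · simp only [List.length_map]
      rw [hAL, hBL]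
    · intro j h1 h2
      have hjk : j < k := by
        simp only [List.length_map] at h1
        rw [hAL] at h1
        exact h1
      simp only [List.getElem_map]
      congr 1
      rw [← List.getD_eq_getElem _ [] (by simpa only [List.length_map] using h1),
          ← List.getD_eq_getElem _ [] (by simpa only [List.length_map] using h2)]
      have hrep : (List.replicate k ([] : List Char)).getD j [] = [] := by
        rw [List.getD_eq_getElem _ _ (by simpa using hjk)]
        simp
      rw [hAG j hjk, hBG j hjk, if_pos hjk, hrep, List.nil_append,
        sel_eq_stride k j hk0 hjk cs 0 j hjk (by simpa using Nat.mod_eq_of_lt hjk)]
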